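-- pv_equiv track=rewrite | github.com/briztdb/Portfolio | ArmadilloV8/armadilloassembler copy.py | generateOpcode
-- ===== SOURCE A (Python) =====
-- def generateOpcode(destReg, operation, source1, source2): #Function where given operands and mnemonic, corresponding opcode will be generated
--     instruction = [] #create string of 18-bits all 0 to start
--     for i in range(18): # Fill instruction with 0's
--         instruction.append('0')
--     instruction[15] = '1' # All instructions have a 1 at the 14th bit
--     if(operation != "please"): # If not loading, use ALU
--         instruction[17] = '1'
--         if(operation == "add"):
--             instruction[16] = '1'
--         if(destReg == 'earth'):
--             instruction[13] = '0'
--             instruction[14] = '0'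
--         if(destReg == 'wind'):
--             instruction[13] = '0'
--             instruction[14] = '1'
--         if(destReg == 'fire'):
--             instruction[13] = '1'
--             instruction[14] = '0'
--         if(destReg == 'water'):
--             instruction[13] = '1'
--             instruction[14] = '1'
--         if(source1 == 'earth'):
--             instruction[11] = '0'
--             instruction[12] = '0'
--         if(source1 == 'wind'):
--             instruction[11] = '0'
--             instruction[12] = '1'
--         if(source1 == 'fire'):
--             instruction[11] = '1'
--             instruction[12] = '0'
--         if(source1 == 'water'):
--             instruction[11] = '1'
--             instruction[12] = '1'
--         if(source2 == 'earth'):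
--             instruction[9] = '0'
--             instruction[10] = '0'
--         if(source2 == 'wind'):
--             instruction[9] = '0'
--             instruction[10] = '1'
--         if(source2 == 'fire'):
--             instruction[9] = '1'
--             instruction[10] = '0'
--         if(source2 == 'water'):
--             instruction[9] = '1'
--             instruction[10] = '1'
--     else: # Else if loading, binary encoding is different
--         instruction[0] = '1'
--         i = 1
--         for char in source1:
--             instruction[i] = char
--             i += 1
--         if(destReg == 'earth'):
--             instruction[13] = '0'
--             instruction[14] = '0'
--         if(destReg == 'wind'):
--             instruction[13] = '0'
--             instruction[14] = '1'
--         if(destReg == 'fire'):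
--             instruction[13] = '1'
--             instruction[14] = '0'
--         if(destReg == 'water'):
--             instruction[13] = '1'
--             instruction[14] = '1'
--     string = ''.join(instruction) # Put binary encoding into a string
--     num = int(string, 2) #Convert string to binary number
--     instruction = hex(num) # Convert binary number to hexadecimal
--     return instruction
-- ===== SOURCE B (Python) =====
-- def generateOpcode(destReg, operation, source1, source2):
--     REG = {'earth': 0, 'wind': 1, 'fire': 2, 'water': 3}
--     if operation != "please":
--         num = (1
--                + (2 if operation == "add" else 0)
--                + 4
--                + (REG.get(destReg, 0) << 3)
--                + (REG.get(source1, 0) << 5)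
--                + (REG.get(source2, 0) << 7))
--     else:
--         num = (1 << 17) + 4 + (REG.get(destReg, 0) << 3)
--         for j, ch in enumerate(source1):
--             if ch == '1':
--                 num += 1 << (16 - j)
--     return hex(num)
-- ===== Notes on version B (the rewrite author's own statement) =====
-- stated objective: simpler
-- what changed: B maps each register name to a 2-bit code and accumulates the opcode directly as an integer from bit weights, instead of A's building an 18-char list of '0'/'1', mutating it by index, joining it and re-parsing it with int(s, 2); Pre_ excludes load-branch inputs whose source1 is not a string of at most 12 binary digits (non-binary source1 raises ValueError, over-17-char raises IndexError, and 13-17 digits spill into the destination/constant bit positions of the instruction format, a malformed instruction on which either encoding is as defensible).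
-- outside the precondition, e.g. on generateOpcode('earth', 'please', '1111111111111', ''): A returns '0x3ffe4', B returns '0x3fff4'; on generateOpcode('x', 'please', '1_1', ''): A returns '0x1c004', B returns '0x34004'
import Mathlib
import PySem

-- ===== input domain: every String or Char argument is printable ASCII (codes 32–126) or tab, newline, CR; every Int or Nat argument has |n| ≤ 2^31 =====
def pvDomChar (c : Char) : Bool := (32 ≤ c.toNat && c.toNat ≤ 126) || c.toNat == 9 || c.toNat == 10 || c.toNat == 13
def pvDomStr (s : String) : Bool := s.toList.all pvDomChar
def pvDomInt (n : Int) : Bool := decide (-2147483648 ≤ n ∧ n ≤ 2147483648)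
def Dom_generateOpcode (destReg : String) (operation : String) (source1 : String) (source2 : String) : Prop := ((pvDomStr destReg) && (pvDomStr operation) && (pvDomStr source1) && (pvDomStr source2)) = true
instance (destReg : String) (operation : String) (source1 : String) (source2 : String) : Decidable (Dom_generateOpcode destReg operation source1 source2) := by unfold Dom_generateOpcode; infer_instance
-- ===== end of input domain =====

-- B computes the opcode arithmetically (register-code lookup + bit weights accumulated in an
-- integer) instead of A's mutate-a-char-list-then-join-then-parse-binary; objective: simpler.

-- ===== PORT A =====
-- hex() of a nonnegative int (the only ints this program converts): "0x" + lowercase hex digits.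
def pyHex (n : Nat) : String := "0x" ++ String.ofList (Nat.toDigits 16 n)

-- int(s, 2): exact on strings of '0'/'1' characters — the only strings A feeds it under Pre_.
def parseBin (cs : List Char) : Nat := cs.foldl (fun a c => 2 * a + (if c = '1' then 1 else 0)) 0

-- the "i = 1; for char in source1: instruction[i] = char; i += 1" loop; List.set is exact for
-- indices below 18, and Pre_ keeps i within range (the IndexError inputs are outside Pre_).
def setChars : List Char → Nat → List Char → List Char
  | inst, _, [] => inst
  | inst, i, c :: cs => setChars (inst.set i c) (i + 1) cs

-- A's four identical "if(reg == 'earth') … if(reg == 'water') …" blocks, verbatim, writing the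
-- two bits at positions i and j (13/14, 11/12, 9/10).
def pairChain (s : String) (i j : Nat) (inst : List Char) : List Char :=
  let inst := if s = "earth" then ((inst.set i '0').set j '0') else inst
  let inst := if s = "wind" then ((inst.set i '0').set j '1') else inst
  let inst := if s = "fire" then ((inst.set i '1').set j '0') else inst
  let inst := if s = "water" then ((inst.set i '1').set j '1') else inst
  inst

def generateOpcode (destReg : String) (operation : String) (source1 : String) (source2 : String) : String :=
  -- "instruction = []; for i in range(18): instruction.append('0')"
  let instruction : List Char := (PySem.List.pyRange 0 18 1).foldl (fun acc _ => acc ++ ['0']) []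
  let instruction := instruction.set 15 '1'
  let instruction :=
    if operation ≠ "please" then
      let instruction := instruction.set 17 '1'
      let instruction := if operation = "add" then instruction.set 16 '1' else instruction
      let instruction := pairChain destReg 13 14 instruction
      let instruction := pairChain source1 11 12 instruction
      let instruction := pairChain source2 9 10 instruction
      instruction
    else
      let instruction := instruction.set 0 '1'
      let instruction := setChars instruction 1 source1.toList
      let instruction := pairChain destReg 13 14 instruction
      instruction
  pyHex (parseBin instruction)

-- ===== PORT B =====
-- REG.get(s) on the literal dict {'earth': 0, 'wind': 1, 'fire': 2, 'water': 3}.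
def regCode? (s : String) : Option Nat :=
  if s = "earth" then some 0
  else if s = "wind" then some 1
  else if s = "fire" then some 2
  else if s = "water" then some 3
  else none

-- Source B's "for j, ch in enumerate(source1): if ch == '1': num += 1 << (16 - j)"; "x << k" is
-- ported as x * 2 ^ k (exact: both operands nonnegative); "16 - j" is Nat subtraction, which
-- agrees with Python's value for the indices j ≤ 11 reached under Pre_.
def loadBits : Nat → List Char → Nat → Nat
  | _, [], num => num
  | j, c :: cs, num => loadBits (j + 1) cs (if c = '1' then num + 2 ^ (16 - j) else num)

def generateOpcode_alt (destReg : String) (operation : String) (source1 : String) (source2 : String) : String :=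
  let num : Nat :=
    if operation ≠ "please" then
      1 + (if operation = "add" then 2 else 0) + 4
        + ((regCode? destReg).getD 0) * 2 ^ 3
        + ((regCode? source1).getD 0) * 2 ^ 5
        + ((regCode? source2).getD 0) * 2 ^ 7
    else
      loadBits 0 source1.toList (2 ^ 17 + 4 + ((regCode? destReg).getD 0) * 2 ^ 3)
  pyHex num

-- ===== PRECONDITION & SPEC =====
-- Pre_ excludes only load-branch (operation == "please") inputs whose source1 is not a string of
-- at most 12 binary digits: a non-binary source1 raises ValueError in int(s, 2) and one longer
-- than 17 raises IndexError, while a source1 of 13-17 digits spills past the instruction's 12-bit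
-- data field into the destination-register and constant bit positions — a malformed instruction
-- on which no particular encoding is specified, so either program's value is as defensible.
def Pre_generateOpcode (destReg : String) (operation : String) (source1 : String) (source2 : String) : Prop :=
  operation = "please" → (source1.toList.length ≤ 12 ∧ (source1.toList.all (fun c => c == '0' || c == '1')) = true)
instance (destReg : String) (operation : String) (source1 : String) (source2 : String) : Decidable (Pre_generateOpcode destReg operation source1 source2) := by unfold Pre_generateOpcode; infer_instance

def pvWitness_generateOpcode : String × String × String × String := ("fire", "please", "101", "water")

def Spec_generateOpcode (destReg : String) (operation : String) (source1 : String) (source2 : String) (out : String) : Prop := out = generateOpcode_alt destReg operation source1 source2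
instance (destReg : String) (operation : String) (source1 : String) (source2 : String) (out : String) : Decidable (Spec_generateOpcode destReg operation source1 source2 out) := by unfold Spec_generateOpcode; infer_instance

-- ===== CLAIM (what is proved, stated in full; the proofs are below) =====
def Claim_equal_generateOpcode : Prop := ∀ (destReg : String) (operation : String) (source1 : String) (source2 : String), Dom_generateOpcode destReg operation source1 source2 → Pre_generateOpcode destReg operation source1 source2 → Spec_generateOpcode destReg operation source1 source2 (generateOpcode destReg operation source1 source2)

-- ===== LEMMAS AND PROOFS =====
-- numeric code of a register-name string: the four register names, and 4 for anything else
def reg5code (s : String) : Nat :=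
  if s = "earth" then 0 else if s = "wind" then 1 else if s = "fire" then 2 else if s = "water" then 3 else 4

-- the two-bit write pairChain performs, as a function of the numeric code
def setPair (i j c : Nat) (inst : List Char) : List Char :=
  if c = 0 then ((inst.set i '0').set j '0')
  else if c = 1 then ((inst.set i '0').set j '1')
  else if c = 2 then ((inst.set i '1').set j '0')
  else if c = 3 then ((inst.set i '1').set j '1')
  else inst

-- REG.get(s, 0) as a function of the numeric code
def bcode (c : Nat) : Nat := if c = 4 then 0 else c

lemma reg5 (s : String) : s = "earth" ∨ s = "wind" ∨ s = "fire" ∨ s = "water" ∨ (¬ s = "earth" ∧ ¬ s = "wind" ∧ ¬ s = "fire" ∧ ¬ s = "water") := by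
  tauto

lemma reg5code_lt (s : String) : reg5code s < 5 := by
  unfold reg5code; split_ifs <;> omega

lemma pairChain_eq (s : String) (i j : Nat) (inst : List Char) :
    pairChain s i j inst = setPair i j (reg5code s) inst := by
  rcases reg5 s with rfl | rfl | rfl | rfl | ⟨h1, h2, h3, h4⟩ <;>
    simp [pairChain, setPair, reg5code, *]

lemma regCode_getD (s : String) : (regCode? s).getD 0 = bcode (reg5code s) := by
  rcases reg5 s with rfl | rfl | rfl | rfl | ⟨h1, h2, h3, h4⟩ <;>
    simp [regCode?, reg5code, bcode, *]

-- A's range-append loop produces eighteen '0' characters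
lemma initInstr_eq : (PySem.List.pyRange 0 18 1).foldl (fun acc _ => acc ++ ['0']) ([] : List Char) = ['0','0','0','0','0','0','0','0','0','0','0','0','0','0','0','0','0','0'] := by
  decide

lemma parseBin_aux (cs : List Char) : ∀ a : Nat,
    cs.foldl (fun a c => 2 * a + (if c = '1' then 1 else 0)) a = a * 2 ^ cs.length + parseBin cs := by
  induction cs with
  | nil => intro a; simp [parseBin]
  | cons c cs ih =>
      intro a
      have h1 : parseBin (c :: cs) = cs.foldl (fun a c => 2 * a + (if c = '1' then 1 else 0)) ((if c = '1' then 1 else 0)) := by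
        simp [parseBin]
      simp only [List.foldl_cons, List.length_cons, h1, ih]
      ring

lemma parseBin_nil : parseBin [] = 0 := rfl

lemma parseBin_cons (c : Char) (cs : List Char) :
    parseBin (c :: cs) = (if c = '1' then 1 else 0) * 2 ^ cs.length + parseBin cs := by
  have h1 : parseBin (c :: cs) = cs.foldl (fun a c => 2 * a + (if c = '1' then 1 else 0)) ((if c = '1' then 1 else 0)) := by
    simp [parseBin]
  rw [h1, parseBin_aux]

lemma parseBin_append (xs ys : List Char) :
    parseBin (xs ++ ys) = parseBin xs * 2 ^ ys.length + parseBin ys := by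
  unfold parseBin
  rw [List.foldl_append]
  exact parseBin_aux ys _

lemma setChars_eq : ∀ (l inst : List Char) (i : Nat), i + l.length ≤ inst.length →
    setChars inst i l = (inst.take i ++ l) ++ inst.drop (i + l.length) := by
  intro l
  induction l with
  | nil => intro inst i h; simp [setChars]
  | cons c cs ih =>
      intro inst i h
      simp only [List.length_cons] at h ⊢
      have hi : i < inst.length := by omega
      have hset : inst.set i c = inst.take i ++ c :: inst.drop (i + 1) := by
        rw [List.set_eq_take_append_cons_drop, if_pos hi]
      have hl : (inst.take i).length = i := by simp; omega
      rw [setChars, ih _ _ (by simp; omega), hset]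
      have h1 : (inst.take i ++ c :: inst.drop (i + 1)).take (i + 1) = inst.take i ++ [c] := by
        rw [List.take_append, List.take_of_length_le (by omega), hl]
        simp
      have h2 : (inst.take i ++ c :: inst.drop (i + 1)).drop (i + 1 + cs.length) = inst.drop (i + (cs.length + 1)) := by
        rw [List.drop_append, hl, List.drop_eq_nil_of_le (by omega)]
        have : i + 1 + cs.length - i = cs.length + 1 := by omega
        rw [this]
        simp [List.drop_drop]
        congr 1
        omega
      rw [h1, h2]
      simp [List.append_assoc]

lemma loadBits_eq : ∀ (l : List Char) (j num : Nat), j + l.length ≤ 17 →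
    loadBits j l num = num + parseBin l * 2 ^ (17 - (j + l.length)) := by
  intro l
  induction l with
  | nil => intro j num h; simp [loadBits, parseBin]
  | cons c cs ih =>
      intro j num h
      simp only [List.length_cons] at h ⊢
      rw [loadBits, ih _ _ (by omega), parseBin_cons]
      have hq : 17 - (j + (cs.length + 1)) = 17 - (j + 1 + cs.length) := by omega
      have hp : (16 - j) = cs.length + (17 - (j + 1 + cs.length)) := by omega
      rw [hq, hp, pow_add]
      split_ifs <;> ring

set_option maxHeartbeats 1000000 in
lemma aluEqT (c0 c1 c2 : Fin 5) :
    parseBin (setPair 9 10 c2.val (setPair 11 12 c1.val (setPair 13 14 c0.val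
      (['0','0','0','0','0','0','0','0','0','0','0','0','0','0','0','1','1','1'] : List Char)))) =
    1 + 2 + 4 + bcode c0.val * 2 ^ 3 + bcode c1.val * 2 ^ 5 + bcode c2.val * 2 ^ 7 := by
  revert c0 c1 c2
  decide

set_option maxHeartbeats 1000000 in
lemma aluEqF (c0 c1 c2 : Fin 5) :
    parseBin (setPair 9 10 c2.val (setPair 11 12 c1.val (setPair 13 14 c0.val
      (['0','0','0','0','0','0','0','0','0','0','0','0','0','0','0','1','0','1'] : List Char)))) =
    1 + 0 + 4 + bcode c0.val * 2 ^ 3 + bcode c1.val * 2 ^ 5 + bcode c2.val * 2 ^ 7 := by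
  revert c0 c1 c2
  decide

-- ===== VERDICT =====
set_option maxHeartbeats 2000000 in
theorem generateOpcode_spec : Claim_equal_generateOpcode := by
  intro destReg operation source1 source2 hdom hpre
  unfold Spec_generateOpcode
  simp only [generateOpcode, generateOpcode_alt, initInstr_eq]
  by_cases hop : operation = "please"
  · -- load branch
    subst hop
    obtain ⟨hlen, -⟩ := hpre rfl
    rw [if_neg (by simp), if_neg (by simp)]
    refine congrArg pyHex ?_
    rw [pairChain_eq, regCode_getD]
    generalize source1.toList = l at hlen ⊢
    rw [setChars_eq l _ 1 (by simp; omega), loadBits_eq l 0 _ (by omega)]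
    have hc := reg5code_lt destReg
    generalize reg5code destReg = c at hc ⊢
    have hk : l.length = 0 ∨ l.length = 1 ∨ l.length = 2 ∨ l.length = 3 ∨ l.length = 4 ∨ l.length = 5 ∨ l.length = 6 ∨ l.length = 7 ∨ l.length = 8 ∨ l.length = 9 ∨ l.length = 10 ∨ l.length = 11 ∨ l.length = 12 := by omega
    interval_cases c <;> rcases hk with hk|hk|hk|hk|hk|hk|hk|hk|hk|hk|hk|hk|hk <;>
      simp [hk, setPair, bcode, parseBin_append, parseBin_cons, parseBin_nil] <;> omega
  · -- ALU branch
    rw [if_pos hop, if_pos hop]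
    refine congrArg pyHex ?_
    rw [pairChain_eq, pairChain_eq, pairChain_eq, regCode_getD, regCode_getD, regCode_getD]
    by_cases ha : operation = "add"
    · rw [if_pos ha, if_pos ha]
      exact aluEqT ⟨_, reg5code_lt destReg⟩ ⟨_, reg5code_lt source1⟩ ⟨_, reg5code_lt source2⟩
    · rw [if_neg ha, if_neg ha]
      exact aluEqF ⟨_, reg5code_lt destReg⟩ ⟨_, reg5code_lt source1⟩ ⟨_, reg5code_lt source2⟩
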